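-- pv_equiv track=rewrite | github.com/hyemimi/algorithm | 프로그래머스/3/92344. 파괴되지 않은 건물/파괴되지 않은 건물.py | solution
-- ===== SOURCE A (Python) =====
-- def solution(board, skill):
--     answer = 0
--
--     # 최종적으로 내구도가 1 이상이면 파괴 x
--     # skill [type, r1, c1, r2, c2, degree]
--     # type이 1이면 적의 공격 / type이 2이면 아군의 회복
--     # skill을 돌면서 board를 갱신함.
--
--     n = len(board)
--     m = len(board[0])
--
--     diff = [[0] * (m+1) for _ in range(n+1)]
--     # 스킬 적용
--     for i in range(len(skill)) :
--         type, r1, c1, r2, c2, degree = skill[i]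
--
--         if type == 1:
--             degree = -degree
--
--         diff[r1][c1] += degree
--         diff[r1][c2+1] -= degree
--         diff[r2+1][c1] -= degree
--         diff[r2+1][c2+1] += degree
--
--     # 행 누적합
--     for i in range(n):
--         for j in range(m):
--             diff[i][j+1] += diff[i][j]
--
--     # 열 누적합
--     for j in range(m):
--         for i in range(n):
--             diff[i+1][j] += diff[i][j]
--
--
--
--     # # 카운트
--     for i in range(n):
--         for j in range(m):
--             if diff[i][j] + board[i][j] > 0 :
--                 answer += 1
--
--     return answer
-- ===== SOURCE B (Python) =====
-- def solution(board, skill):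
--     answer = 0
--     m = len(board[0])
--     for i, row in enumerate(board):
--         for j in range(m):
--             delta = 0
--             for t, r1, c1, r2, c2, d in skill:
--                 if r1 <= i <= r2 and c1 <= j <= c2:
--                     delta += -d if t == 1 else d
--             if row[j] + delta > 0:
--                 answer += 1
--     return answer
-- ===== Notes on version B (the rewrite author's own statement) =====
-- stated objective: simpler
-- what changed: B drops A's 2-D difference-array with four-corner updates and two in-place prefix-sum sweeps, and instead evaluates each cell directly, summing the signed degrees of the skills whose rectangle covers it.
-- outside the precondition, e.g. on solution([[1], [1], [1]], [[2, 2, 0, 0, 0, 3]]): A returns 2, B returns 3; on solution([[1], [2]], [[1, -1, 0, 0, 0, 3]]): A returns 2, B returns 1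
import Mathlib
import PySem

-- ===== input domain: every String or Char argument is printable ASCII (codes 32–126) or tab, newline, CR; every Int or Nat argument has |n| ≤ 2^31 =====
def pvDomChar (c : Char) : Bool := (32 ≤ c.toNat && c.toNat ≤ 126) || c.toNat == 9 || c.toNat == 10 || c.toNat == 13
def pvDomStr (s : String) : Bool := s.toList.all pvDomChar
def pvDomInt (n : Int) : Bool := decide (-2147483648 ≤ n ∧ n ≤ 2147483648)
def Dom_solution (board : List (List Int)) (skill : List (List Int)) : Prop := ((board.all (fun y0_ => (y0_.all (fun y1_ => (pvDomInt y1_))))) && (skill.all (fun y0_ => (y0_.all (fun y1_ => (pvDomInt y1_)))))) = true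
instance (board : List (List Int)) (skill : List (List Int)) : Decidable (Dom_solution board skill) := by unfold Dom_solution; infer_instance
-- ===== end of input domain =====

-- B replaces A's difference-array + double prefix-sum pipeline by a direct per-cell sum of the
-- covering skills' signed degrees (simpler; same return value on Pre_).

-- ===== PORT A =====
-- grid helpers for A's in-place 2-D list updates
def pvGGet (g : List (List Int)) (i j : Nat) : Int := (g.getD i []).getD j 0

def pvGAdd (g : List (List Int)) (i j : Nat) (v : Int) : List (List Int) :=
  g.modify i (fun row => row.modify j (fun x => x + v))

-- Python 'diff[r][c] += v' with Int indices; exact on Pre_ (indices nonnegative and in range;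
-- negative wraparound / IndexError inputs are excluded by Pre_)
def pvGAddI (g : List (List Int)) (r c : Int) (v : Int) : List (List Int) :=
  pvGAdd g r.toNat c.toNat v

def pvApplySkill (g : List (List Int)) (s : List Int) : List (List Int) :=
  match s with
  | [t, r1, c1, r2, c2, d0] =>
      let d := if t = 1 then -d0 else d0
      pvGAddI (pvGAddI (pvGAddI (pvGAddI g r1 c1 d) r1 (c2 + 1) (-d)) (r2 + 1) c1 (-d)) (r2 + 1) (c2 + 1) d
  | _ => g  -- Python raises ValueError on a non-6-tuple row; excluded by Pre_

-- diff[i][j+1] += diff[i][j]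
def pvRowStep (g : List (List Int)) (i j : Nat) : List (List Int) :=
  g.modify i (fun row => row.modify (j + 1) (fun x => x + row.getD j 0))

-- diff[i+1][j] += diff[i][j]
def pvColStep (g : List (List Int)) (i j : Nat) : List (List Int) :=
  pvGAdd g (i + 1) j (pvGGet g i j)

def solution (board : List (List Int)) (skill : List (List Int)) : Int :=
  let n := board.length
  let m := (board.headI).length   -- len(board[0]); board = [] raises IndexError, excluded by Pre_
  let g0 := List.replicate (n + 1) (List.replicate (m + 1) (0 : Int))
  let g1 := skill.foldl pvApplySkill g0
  let g2 := (List.range n).foldl (fun g i => (List.range m).foldl (fun g j => pvRowStep g i j) g) g1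
  let g3 := (List.range m).foldl (fun g j => (List.range n).foldl (fun g i => pvColStep g i j) g) g2
  (List.range n).foldl (fun a i => (List.range m).foldl
      (fun a j => if pvGGet g3 i j + pvGGet board i j > 0 then a + 1 else a) a) 0

-- ===== PORT B =====
def solution_alt (board : List (List Int)) (skill : List (List Int)) : Int :=
  let m := (board.headI).length   -- len(board[0]); board = [] raises IndexError, excluded by Pre_
  (PySem.List.enumerate board 0).foldl (fun answer p =>
    (List.range m).foldl (fun (answer : Int) (j : Nat) =>
      let delta : Int := skill.foldl (fun (delta : Int) s =>
        match s with
        | [t, r1, c1, r2, c2, d] =>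
            if r1 ≤ p.1 ∧ p.1 ≤ r2 ∧ c1 ≤ (j : Int) ∧ (j : Int) ≤ c2 then
              delta + (if t = 1 then -d else d)
            else delta
        | _ => delta) 0   -- Python raises ValueError on a non-6-tuple row; excluded by Pre_
      -- row[j]; in range on Pre_ (j < m ≤ row length)
      if p.2.getD j 0 + delta > 0 then answer + 1 else answer) answer) 0

-- ===== PRECONDITION & SPEC =====
-- Pre_ excludes inputs where A raises (empty board, a board row shorter than row 0, a skill row that
-- is not a 6-tuple, rectangle coordinates ≥ the board size) and, among inputs where A still returns,
-- skills with negative coordinates (Python's negative-index wraparound is accidental) and inverted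
-- rectangles r1 > r2 or c1 > c2 (A's four-corner encoding then applies an accidental band of damage);
-- both corners are outside the problem's contract and A's values there are artefacts of its encoding.
def Pre_solution (board : List (List Int)) (skill : List (List Int)) : Prop :=
  board ≠ [] ∧
  (∀ row ∈ board, (board.headI).length ≤ row.length) ∧
  (∀ s ∈ skill, s.length = 6 ∧
    0 ≤ s.getD 1 0 ∧ s.getD 1 0 ≤ s.getD 3 0 ∧ s.getD 3 0 < (board.length : Int) ∧
    0 ≤ s.getD 2 0 ∧ s.getD 2 0 ≤ s.getD 4 0 ∧ s.getD 4 0 < ((board.headI).length : Int))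

instance (board : List (List Int)) (skill : List (List Int)) : Decidable (Pre_solution board skill) := by
  unfold Pre_solution; infer_instance

def pvWitness_solution : List (List Int) × List (List Int) :=
  ([[1, 2], [3, 0]], [[1, 0, 0, 1, 1, 2], [2, 0, 0, 0, 1, 1]])

def Spec_solution (board : List (List Int)) (skill : List (List Int)) (out : Int) : Prop := out = solution_alt board skill
instance (board : List (List Int)) (skill : List (List Int)) (out : Int) : Decidable (Spec_solution board skill out) := by unfold Spec_solution; infer_instance

-- ===== CLAIM (what is proved, stated in full; the proofs are below) =====
def Claim_equal_solution : Prop := ∀ (board : List (List Int)) (skill : List (List Int)), Dom_solution board skill → Pre_solution board skill → Spec_solution board skill (solution board skill)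

-- ===== LEMMAS AND PROOFS =====

-- the signed degree of one skill row
def pvEff (s : List Int) : Int := if s.getD 0 0 = 1 then -(s.getD 5 0) else s.getD 5 0

-- total signed effect of all skills on cell (i, j)
def pvS (skill : List (List Int)) (i j : Int) : Int :=
  (skill.map (fun s =>
    if s.getD 1 0 ≤ i ∧ i ≤ s.getD 3 0 ∧ s.getD 2 0 ≤ j ∧ j ≤ s.getD 4 0 then pvEff s else 0)).sum

-- the four-corner difference contribution of one skill at cell (i, j)
def pvCorner (s : List Int) (i j : Nat) : Int :=
  (if (i : Int) = s.getD 1 0 ∧ (j : Int) = s.getD 2 0 then pvEff s else 0)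
  - (if (i : Int) = s.getD 1 0 ∧ (j : Int) = s.getD 4 0 + 1 then pvEff s else 0)
  - (if (i : Int) = s.getD 3 0 + 1 ∧ (j : Int) = s.getD 2 0 then pvEff s else 0)
  + (if (i : Int) = s.getD 3 0 + 1 ∧ (j : Int) = s.getD 4 0 + 1 then pvEff s else 0)

-- the grid is an R × C rectangle
def pvRect (g : List (List Int)) (R C : Nat) : Prop :=
  g.length = R ∧ ∀ i, i < R → (g.getD i []).length = C

-- per-skill precondition shape, relative to grid size n × m
def pvOk (n m : Nat) (s : List Int) : Prop :=
  s.length = 6 ∧ 0 ≤ s.getD 1 0 ∧ s.getD 1 0 ≤ s.getD 3 0 ∧ s.getD 3 0 < (n : Int) ∧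
  0 ≤ s.getD 2 0 ∧ s.getD 2 0 ≤ s.getD 4 0 ∧ s.getD 4 0 < (m : Int)

-- the common normal form of both programs
def pvCount (board : List (List Int)) (skill : List (List Int)) : Int :=
  (List.range board.length).foldl (fun a i =>
    (List.range (board.headI).length).foldl
      (fun a j => if pvGGet board i j + pvS skill (i : Int) (j : Int) > 0 then a + 1 else a) a) 0

theorem pv_getD_modify {α : Type} (l : List α) (p q : Nat) (f : α → α) (d : α) :
    (l.modify p f).getD q d = if p = q ∧ q < l.length then f (l.getD q d) else l.getD q d := by
  by_cases hq : q < l.length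
  · by_cases hpq : p = q <;>
      simp [List.getD_eq_getElem?_getD, hpq, hq]
  · have hnone : l[q]? = none := by
      rw [List.getElem?_eq_none_iff]; omega
    simp [List.getD_eq_getElem?_getD, hq]

theorem pv_modify_modify {α : Type} (l : List α) (i : Nat) (f g : α → α) :
    (l.modify i f).modify i g = l.modify i (fun x => g (f x)) := by
  apply List.ext_getElem (by simp)
  intro k h1 h2
  simp only [List.getElem_modify]
  split_ifs with h <;> rfl

theorem pv_rect_gadd {g : List (List Int)} {R C : Nat} (h : pvRect g R C) (a b : Nat) (v : Int) :
    pvRect (pvGAdd g a b v) R C := by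
  obtain ⟨hlen, hrow⟩ := h
  refine ⟨by simpa [pvGAdd] using hlen, ?_⟩
  intro i hi
  unfold pvGAdd
  rw [pv_getD_modify]
  split_ifs with h1
  · simpa using hrow i hi
  · exact hrow i hi

theorem pv_gadd_get {g : List (List Int)} {R C : Nat} (h : pvRect g R C)
    {a b : Nat} (ha : a < R) (hb : b < C) (v : Int) (i j : Nat) :
    pvGGet (pvGAdd g a b v) i j = pvGGet g i j + (if i = a ∧ j = b then v else 0) := by
  obtain ⟨hlen, hrow⟩ := h
  unfold pvGGet pvGAdd
  rw [pv_getD_modify]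
  by_cases hia : a = i
  · subst hia
    rw [if_pos ⟨rfl, by omega⟩, pv_getD_modify]
    have hrl : (g.getD a []).length = C := hrow a (by omega)
    by_cases hjb : b = j
    · subst hjb
      rw [if_pos ⟨rfl, by omega⟩, if_pos ⟨rfl, rfl⟩]
    · rw [if_neg (by tauto), if_neg (by tauto), add_zero]
  · rw [if_neg (by tauto), if_neg (by tauto), add_zero]

theorem pv_rect_apply {g : List (List Int)} {n m : Nat} (h : pvRect g (n+1) (m+1))
    (s : List Int) : pvRect (pvApplySkill g s) (n+1) (m+1) := by
  rcases s with _ | ⟨t, _ | ⟨r1, _ | ⟨c1, _ | ⟨r2, _ | ⟨c2, _ | ⟨d0, _ | ⟨x, rest⟩⟩⟩⟩⟩⟩⟩ <;>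
    simp only [pvApplySkill, pvGAddI] <;>
    first
      | exact h
      | exact pv_rect_gadd (pv_rect_gadd (pv_rect_gadd (pv_rect_gadd h _ _ _) _ _ _) _ _ _) _ _ _

theorem pv_apply_get {g : List (List Int)} {n m : Nat} (h : pvRect g (n+1) (m+1))
    {s : List Int} (hs : pvOk n m s) (i j : Nat) :
    pvGGet (pvApplySkill g s) i j = pvGGet g i j + pvCorner s i j := by
  obtain ⟨hlen6, hr1, hr12, hr2, hc1, hc12, hc2⟩ := hs
  rcases s with _ | ⟨t, _ | ⟨r1, _ | ⟨c1, _ | ⟨r2, _ | ⟨c2, _ | ⟨d0, _ | ⟨x, rest⟩⟩⟩⟩⟩⟩⟩ <;>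
    simp only [List.length] at hlen6 <;> try omega
  simp only [List.getD, List.getElem?_cons_zero, List.getElem?_cons_succ, Option.getD_some] at hr1 hr12 hr2 hc1 hc12 hc2
  have h1 := pv_rect_gadd h r1.toNat c1.toNat (if t = 1 then -d0 else d0)
  have h2 := pv_rect_gadd h1 r1.toNat (c2+1).toNat (-(if t = 1 then -d0 else d0))
  have h3 := pv_rect_gadd h2 (r2+1).toNat c1.toNat (-(if t = 1 then -d0 else d0))
  simp only [pvApplySkill, pvGAddI]
  rw [pv_gadd_get h3 (by omega) (by omega), pv_gadd_get h2 (by omega) (by omega),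
      pv_gadd_get h1 (by omega) (by omega), pv_gadd_get h (by omega) (by omega)]
  have e1 : (i = r1.toNat ∧ j = c1.toNat) ↔ ((i : Int) = r1 ∧ (j : Int) = c1) := by omega
  have e2 : (i = r1.toNat ∧ j = (c2+1).toNat) ↔ ((i : Int) = r1 ∧ (j : Int) = c2 + 1) := by omega
  have e3 : (i = (r2+1).toNat ∧ j = c1.toNat) ↔ ((i : Int) = r2 + 1 ∧ (j : Int) = c1) := by omega
  have e4 : (i = (r2+1).toNat ∧ j = (c2+1).toNat) ↔ ((i : Int) = r2 + 1 ∧ (j : Int) = c2 + 1) := by omega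
  simp only [pvCorner, pvEff, List.getD, List.getElem?_cons_zero, List.getElem?_cons_succ,
    Option.getD_some, e1.symm, e2.symm, e3.symm, e4.symm]
  have hneg : ∀ (P : Prop) (_ : Decidable P),
      (if P then -(if t = 1 then -d0 else d0) else 0)
        = -(if P then (if t = 1 then -d0 else d0) else 0) := by
    intro P _; split_ifs <;> simp
  rw [hneg _ _, hneg _ _]
  ring

theorem pv_phase1 {n m : Nat} (skill : List (List Int)) :
    ∀ g, pvRect g (n+1) (m+1) → (∀ s ∈ skill, pvOk n m s) →
      pvRect (skill.foldl pvApplySkill g) (n+1) (m+1) ∧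
      ∀ i j, pvGGet (skill.foldl pvApplySkill g) i j
        = pvGGet g i j + (skill.map (fun s => pvCorner s i j)).sum := by
  induction skill with
  | nil => intro g hg _; exact ⟨hg, by simp⟩
  | cons s rest ih =>
    intro g hg hsk
    have hs := hsk s (by simp)
    obtain ⟨hre, hval⟩ := ih (pvApplySkill g s) (pv_rect_apply hg s)
      (fun x hx => hsk x (by simp [hx]))
    refine ⟨hre, ?_⟩
    intro i j
    rw [List.foldl_cons, hval i j, pv_apply_get hg hs i j]
    simp [add_assoc]

theorem pv_base_rect (n m : Nat) :
    pvRect (List.replicate (n + 1) (List.replicate (m + 1) (0 : Int))) (n+1) (m+1) := by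
  refine ⟨by simp, ?_⟩
  intro i hi
  simp [List.getD_eq_getElem?_getD, hi]

theorem pv_base_get (n m i j : Nat) :
    pvGGet (List.replicate (n + 1) (List.replicate (m + 1) (0 : Int))) i j = 0 := by
  unfold pvGGet
  by_cases hi : i < n + 1
  · have h1 : (List.replicate (n + 1) (List.replicate (m + 1) (0 : Int))).getD i []
        = List.replicate (m + 1) 0 := by
      rw [List.getD_eq_getElem?_getD, List.getElem?_replicate, if_pos hi]; rfl
    rw [h1, List.getD_eq_getElem?_getD, List.getElem?_replicate]
    split_ifs <;> rfl
  · have h1 : (List.replicate (n + 1) (List.replicate (m + 1) (0 : Int))).getD i [] = [] := by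
      rw [List.getD_eq_getElem?_getD, List.getElem?_replicate, if_neg hi]; rfl
    rw [h1]; rfl

-- the inner row loop of phase 2, acting on a single row
def pvPrefixRow (m : Nat) (row : List Int) : List Int :=
  (List.range m).foldl (fun r j => r.modify (j + 1) (fun x => x + r.getD j 0)) row

theorem pv_modify_fold {α : Type} (L : List Nat) (i : Nat) (F : Nat → α → α) :
    ∀ (l : List α), L.foldl (fun l j => l.modify i (F j)) l
      = l.modify i (fun x => L.foldl (fun r j => F j r) x) := by
  induction L with
  | nil => intro l; exact (List.modify_id i l).symm
  | cons a L ih =>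
    intro l
    simp only [List.foldl_cons]
    rw [ih, pv_modify_modify]

theorem pv_foldl_modify_len : ∀ (L : List Nat) (row : List Int),
    ((L.foldl (fun r j => r.modify (j + 1) (fun x => x + r.getD j 0)) row)).length = row.length := by
  intro L
  induction L with
  | nil => intro row; rfl
  | cons a L ih => intro row; rw [List.foldl_cons, ih]; simp

theorem pv_prefixrow_len (m : Nat) (row : List Int) : (pvPrefixRow m row).length = row.length := by
  exact pv_foldl_modify_len (List.range m) row

theorem pv_prefixrow_get {m : Nat} {row : List Int} (_hlen : row.length = m + 1) :
    ∀ t, t ≤ m → ∀ j,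
      ((List.range t).foldl (fun r j => r.modify (j + 1) (fun x => x + r.getD j 0)) row).getD j 0
        = if j ≤ t then ∑ k ∈ Finset.range (j + 1), row.getD k 0 else row.getD j 0 := by
  intro t
  induction t with
  | zero =>
    intro _ j
    simp only [List.range_zero, List.foldl_nil]
    split_ifs with h
    · have hj : j = 0 := by omega
      subst hj; simp
    · rfl
  | succ t iht =>
    intro ht j
    rw [List.range_succ, List.foldl_append, List.foldl_cons, List.foldl_nil, pv_getD_modify]
    have hL := pv_foldl_modify_len (List.range t) row
    have iht' := iht (by omega)
    by_cases hj : j = t + 1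
    · subst hj
      rw [if_pos ⟨rfl, by omega⟩, iht' (t+1), iht' t, if_neg (by omega), if_pos (by omega),
        if_pos (by omega)]
      simp only [Finset.sum_range_succ]
      ring
    · rw [if_neg (by omega), iht' j]
      by_cases hjt : j ≤ t
      · rw [if_pos hjt, if_pos (by omega)]
      · rw [if_neg hjt, if_neg (by omega)]

theorem pv_phase2_rows {g : List (List Int)} {n m : Nat} (h : pvRect g (n+1) (m+1)) :
    ∀ t, t ≤ n → ∀ i,
      ((List.range t).foldl (fun g i => (List.range m).foldl (fun g j => pvRowStep g i j) g) g).getD i []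
        = if i < t then pvPrefixRow m (g.getD i []) else g.getD i [] := by
  have hglen := h.1
  intro t
  induction t with
  | zero => intro _ i; simp
  | succ t iht =>
    intro ht i
    rw [List.range_succ, List.foldl_append, List.foldl_cons, List.foldl_nil]
    have hstep : ∀ (r : Nat) (G : List (List Int)),
        (List.range m).foldl (fun g j => pvRowStep g r j) G
          = G.modify r (fun row => pvPrefixRow m row) := by
      intro r G
      exact pv_modify_fold (List.range m) r
        (fun j row => row.modify (j + 1) (fun x => x + row.getD j 0)) G
    rw [hstep, pv_getD_modify]
    have hlen : ((List.range t).foldl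
        (fun g i => (List.range m).foldl (fun g j => pvRowStep g i j) g) g).length = g.length := by
      clear iht ht hglen h
      generalize (List.range t) = L
      induction L generalizing g with
      | nil => rfl
      | cons a L ih => rw [List.foldl_cons, hstep a g, ih]; simp
    have iht' := iht (by omega)
    by_cases hit : t = i
    · subst hit
      rw [if_pos ⟨rfl, by omega⟩, iht' t, if_neg (by omega), if_pos (by omega)]
    · rw [if_neg (by tauto), iht' i]
      by_cases hlt : i < t
      · rw [if_pos hlt, if_pos (by omega)]
      · rw [if_neg hlt, if_neg (by omega)]

theorem pv_phase3_inner {n m : Nat} {j : Nat} (hj : j < m + 1) :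
    ∀ t, t ≤ n → ∀ g, pvRect g (n+1) (m+1) →
      pvRect ((List.range t).foldl (fun g i => pvColStep g i j) g) (n+1) (m+1) ∧
      ∀ i j', pvGGet ((List.range t).foldl (fun g i => pvColStep g i j) g) i j'
        = if j' = j ∧ i ≤ t then ∑ k ∈ Finset.range (i + 1), pvGGet g k j else pvGGet g i j' := by
  intro t
  induction t with
  | zero =>
    intro _ g hg
    refine ⟨hg, ?_⟩
    intro i j'
    simp only [List.range_zero, List.foldl_nil]
    split_ifs with hc
    · obtain ⟨hj', hi⟩ := hc
      have hi0 : i = 0 := by omega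
      subst hi0; subst hj'
      simp
    · rfl
  | succ t iht =>
    intro ht g hg
    obtain ⟨hre, hval⟩ := iht (by omega) g hg
    rw [List.range_succ, List.foldl_append, List.foldl_cons, List.foldl_nil]
    have hcol : ∀ (G : List (List Int)), pvColStep G t j = pvGAdd G (t+1) j (pvGGet G t j) :=
      fun _ => rfl
    rw [hcol]
    refine ⟨pv_rect_gadd hre _ _ _, ?_⟩
    intro i j'
    rw [pv_gadd_get hre (show t + 1 < n + 1 by omega) hj _ i j', hval i j', hval t j,
      if_pos (show j = j ∧ t ≤ t from ⟨rfl, le_refl t⟩)]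
    by_cases hj'j : j' = j
    · by_cases hi1 : i ≤ t
      · rw [if_pos (show j' = j ∧ i ≤ t from ⟨hj'j, hi1⟩),
          if_neg (show ¬(i = t + 1 ∧ j' = j) by omega),
          if_pos (show j' = j ∧ i ≤ t + 1 from ⟨hj'j, by omega⟩), add_zero]
      · by_cases hi2 : i = t + 1
        · rw [if_neg (show ¬(j' = j ∧ i ≤ t) by tauto),
            if_pos (show i = t + 1 ∧ j' = j from ⟨hi2, hj'j⟩),
            if_pos (show j' = j ∧ i ≤ t + 1 from ⟨hj'j, by omega⟩)]
          rw [hj'j, hi2, Finset.sum_range_succ (fun k => pvGGet g k j) (t + 1)]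
          ring
        · rw [if_neg (show ¬(j' = j ∧ i ≤ t) by omega),
            if_neg (show ¬(i = t + 1 ∧ j' = j) by omega),
            if_neg (show ¬(j' = j ∧ i ≤ t + 1) by omega), add_zero]
    · rw [if_neg (show ¬(j' = j ∧ i ≤ t) by tauto),
        if_neg (show ¬(i = t + 1 ∧ j' = j) by tauto),
        if_neg (show ¬(j' = j ∧ i ≤ t + 1) by tauto), add_zero]

theorem pv_phase3 {n m : Nat} :
    ∀ t, t ≤ m → ∀ g, pvRect g (n+1) (m+1) →
      pvRect ((List.range t).foldl (fun g j => (List.range n).foldl (fun g i => pvColStep g i j) g) g) (n+1) (m+1) ∧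
      ∀ i j', i ≤ n →
      pvGGet ((List.range t).foldl (fun g j => (List.range n).foldl (fun g i => pvColStep g i j) g) g) i j'
        = if j' < t then ∑ k ∈ Finset.range (i + 1), pvGGet g k j' else pvGGet g i j' := by
  intro t
  induction t with
  | zero => intro _ g hg; exact ⟨hg, fun i j' _ => by simp⟩
  | succ t iht =>
    intro ht g hg
    obtain ⟨hre, hval⟩ := iht (by omega) g hg
    rw [List.range_succ, List.foldl_append, List.foldl_cons, List.foldl_nil]
    obtain ⟨hre2, hval2⟩ := pv_phase3_inner (j := t) (by omega) n le_rfl _ hre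
    refine ⟨hre2, ?_⟩
    intro i j' hi
    rw [hval2 i j']
    by_cases h1 : j' = t
    · subst h1
      rw [if_pos ⟨rfl, hi⟩, if_pos (by omega)]
      apply Finset.sum_congr rfl
      intro k hk
      rw [Finset.mem_range] at hk
      rw [hval k j' (by omega), if_neg (by omega)]
    · rw [if_neg (by tauto), hval i j' hi]
      by_cases h2 : j' < t
      · rw [if_pos h2, if_pos (by omega)]
      · rw [if_neg h2, if_neg (by omega)]

theorem pv_point_sum (a : Int) (ha : 0 ≤ a) (N : Nat) (v : Int) :
    (∑ k ∈ Finset.range N, if (k : Int) = a then v else 0) = if a < (N : Int) then v else 0 := by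
  have h1 : ∀ k : Nat, ((k : Int) = a) ↔ (k = a.toNat) := by intro k; omega
  calc (∑ k ∈ Finset.range N, if (k : Int) = a then v else 0)
      = ∑ k ∈ Finset.range N, if k = a.toNat then v else 0 := by
        apply Finset.sum_congr rfl
        intro k _
        exact if_congr (h1 k) rfl rfl
    _ = if a.toNat ∈ Finset.range N then v else 0 :=
        Finset.sum_ite_eq' (Finset.range N) a.toNat (fun _ => v)
    _ = if a < (N : Int) then v else 0 := by
        by_cases h : a.toNat ∈ Finset.range N
        · rw [if_pos h, if_pos (by rw [Finset.mem_range] at h; omega)]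
        · rw [if_neg h, if_neg (by rw [Finset.mem_range] at h; omega)]

theorem pv_point_sum2 (a c : Int) (ha : 0 ≤ a) (hc : 0 ≤ c) (N M : Nat) (v : Int) :
    (∑ k ∈ Finset.range N, ∑ b ∈ Finset.range M, if (k : Int) = a ∧ (b : Int) = c then v else 0)
      = if a < (N : Int) ∧ c < (M : Int) then v else 0 := by
  have inner : ∀ k : Nat, (∑ b ∈ Finset.range M, if ((k : Int) = a ∧ (b : Int) = c) then v else 0)
      = if (k : Int) = a then (if c < (M : Int) then v else 0) else 0 := by
    intro k
    by_cases hk : (k : Int) = a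
    · rw [if_pos hk, ← pv_point_sum c hc M v]
      apply Finset.sum_congr rfl
      intro b _
      exact if_congr (by tauto) rfl rfl
    · rw [if_neg hk]
      apply Finset.sum_eq_zero
      intro b _
      rw [if_neg (by tauto)]
  calc (∑ k ∈ Finset.range N, ∑ b ∈ Finset.range M, if ((k : Int) = a ∧ (b : Int) = c) then v else 0)
      = ∑ k ∈ Finset.range N, if (k : Int) = a then (if c < (M : Int) then v else 0) else 0 :=
        Finset.sum_congr rfl (fun k _ => inner k)
    _ = if a < (N : Int) then (if c < (M : Int) then v else 0) else 0 := pv_point_sum a ha N _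
    _ = if a < (N : Int) ∧ c < (M : Int) then v else 0 :=
        (ite_and (a < (N : Int)) (c < (M : Int)) v 0).symm

theorem pv_skill_telescope {n m : Nat} {s : List Int} (hs : pvOk n m s) {i j : Nat}
    (_hi : i < n) (_hj : j < m) :
    (∑ k ∈ Finset.range (i + 1), ∑ b ∈ Finset.range (j + 1), pvCorner s k b)
      = if s.getD 1 0 ≤ (i : Int) ∧ (i : Int) ≤ s.getD 3 0 ∧ s.getD 2 0 ≤ (j : Int) ∧ (j : Int) ≤ s.getD 4 0
        then pvEff s else 0 := by
  obtain ⟨hlen6, hr1, hr12, hr2, hc1, hc12, hc2⟩ := hs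
  rcases s with _ | ⟨t, _ | ⟨r1, _ | ⟨c1, _ | ⟨r2, _ | ⟨c2, _ | ⟨d0, _ | ⟨x, rest⟩⟩⟩⟩⟩⟩⟩ <;>
    simp only [List.length] at hlen6 <;> try omega
  simp only [List.getD, List.getElem?_cons_zero, List.getElem?_cons_succ,
    Option.getD_some] at hr1 hr12 hr2 hc1 hc12 hc2 ⊢
  simp only [pvCorner, pvEff, List.getD, List.getElem?_cons_zero, List.getElem?_cons_succ,
    Option.getD_some]
  simp only [Finset.sum_sub_distrib, Finset.sum_add_distrib]
  rw [pv_point_sum2 r1 c1 (by omega) (by omega), pv_point_sum2 r1 (c2+1) (by omega) (by omega),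
    pv_point_sum2 (r2+1) c1 (by omega) (by omega), pv_point_sum2 (r2+1) (c2+1) (by omega) (by omega)]
  push_cast
  split_ifs <;> omega

theorem pv_sum_comm_list {γ : Type} (F : Finset γ) (l : List (List Int)) (f : List Int → γ → Int) :
    (∑ x ∈ F, (l.map (fun s => f s x)).sum) = (l.map (fun s => ∑ x ∈ F, f s x)).sum := by
  induction l with
  | nil => simp
  | cons s l ih => simp [Finset.sum_add_distrib, ih]

theorem pv_phase2_rect {g : List (List Int)} {n m : Nat} (h : pvRect g (n+1) (m+1)) :
    pvRect ((List.range n).foldl (fun g i => (List.range m).foldl (fun g j => pvRowStep g i j) g) g)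
      (n+1) (m+1) := by
  have hstep : ∀ (r : Nat) (G : List (List Int)),
      (List.range m).foldl (fun g j => pvRowStep g r j) G
        = G.modify r (fun row => pvPrefixRow m row) := by
    intro r G
    exact pv_modify_fold (List.range m) r
      (fun j row => row.modify (j + 1) (fun x => x + row.getD j 0)) G
  constructor
  · have hL : ∀ (L : List Nat) (G : List (List Int)),
        ((L.foldl (fun g i => (List.range m).foldl (fun g j => pvRowStep g i j) g) G)).length
          = G.length := by
      intro L
      induction L with
      | nil => intro G; rfl
      | cons a L ih => intro G; rw [List.foldl_cons, hstep a G, ih]; simp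
    rw [hL]; exact h.1
  · intro i hi
    rw [pv_phase2_rows h n le_rfl i]
    split_ifs with hlt
    · rw [pv_prefixrow_len]; exact h.2 i hi
    · exact h.2 i hi

theorem pv_master (n m : Nat) (skill : List (List Int)) (hsk : ∀ s ∈ skill, pvOk n m s)
    {i j : Nat} (hi : i < n) (hj : j < m) :
    pvGGet ((List.range m).foldl (fun g j => (List.range n).foldl (fun g i => pvColStep g i j) g)
      ((List.range n).foldl (fun g i => (List.range m).foldl (fun g j => pvRowStep g i j) g)
        (skill.foldl pvApplySkill (List.replicate (n + 1) (List.replicate (m + 1) (0 : Int)))))) i j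
      = pvS skill (i : Int) (j : Int) := by
  obtain ⟨h1re, h1val⟩ := pv_phase1 skill _ (pv_base_rect n m) hsk
  set g1 := skill.foldl pvApplySkill (List.replicate (n + 1) (List.replicate (m + 1) (0 : Int)))
    with hg1
  set g2 := (List.range n).foldl (fun g i => (List.range m).foldl (fun g j => pvRowStep g i j) g) g1
    with hg2
  have h2re : pvRect g2 (n+1) (m+1) := pv_phase2_rect h1re
  have hget2 : ∀ (a b : Nat), a < n → b ≤ m →
      pvGGet g2 a b = ∑ x ∈ Finset.range (b + 1), pvGGet g1 a x := by
    intro a b han hbm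
    unfold pvGGet
    rw [hg2, pv_phase2_rows h1re n le_rfl a, if_pos han]
    have hlen : (g1.getD a []).length = m + 1 := h1re.2 a (by omega)
    unfold pvPrefixRow
    rw [pv_prefixrow_get hlen m le_rfl b, if_pos hbm]
  rw [(pv_phase3 m le_rfl g2 h2re).2 i j (by omega), if_pos hj]
  calc (∑ k ∈ Finset.range (i + 1), pvGGet g2 k j)
      = ∑ k ∈ Finset.range (i + 1), ∑ b ∈ Finset.range (j + 1), pvGGet g1 k b := by
        apply Finset.sum_congr rfl
        intro k hk
        rw [Finset.mem_range] at hk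
        exact hget2 k j (by omega) (by omega)
    _ = ∑ k ∈ Finset.range (i + 1), ∑ b ∈ Finset.range (j + 1),
          (skill.map (fun s => pvCorner s k b)).sum := by
        apply Finset.sum_congr rfl
        intro k _
        apply Finset.sum_congr rfl
        intro b _
        rw [h1val k b, pv_base_get n m k b, zero_add]
    _ = ∑ k ∈ Finset.range (i + 1),
          (skill.map (fun s => ∑ b ∈ Finset.range (j + 1), pvCorner s k b)).sum := by
        apply Finset.sum_congr rfl
        intro k _
        exact pv_sum_comm_list (Finset.range (j + 1)) skill (fun s b => pvCorner s k b)
    _ = (skill.map (fun s => ∑ k ∈ Finset.range (i + 1),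
          ∑ b ∈ Finset.range (j + 1), pvCorner s k b)).sum :=
        pv_sum_comm_list (Finset.range (i + 1)) skill
          (fun s k => ∑ b ∈ Finset.range (j + 1), pvCorner s k b)
    _ = pvS skill (i : Int) (j : Int) := by
        unfold pvS
        congr 1
        apply List.map_congr_left
        intro s hsmem
        exact pv_skill_telescope (hsk s hsmem) hi hj

theorem pv_A_eq_count (board skill : List (List Int)) (hpre : Pre_solution board skill) :
    solution board skill = pvCount board skill := by
  obtain ⟨hne, hrows, hsk⟩ := hpre
  have hskOk : ∀ s ∈ skill, pvOk board.length (board.headI).length s := fun s hsm => hsk s hsm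
  simp only [solution, pvCount]
  apply PySem.List.foldl_congr_mem
  intro acc i hi
  apply PySem.List.foldl_congr_mem
  intro acc2 j hj
  rw [List.mem_range] at hi hj
  rw [pv_master board.length (board.headI).length skill hskOk hi hj]
  exact if_congr (by constructor <;> intro <;> omega) rfl rfl

theorem pv_B_eq_count (board skill : List (List Int)) (hpre : Pre_solution board skill) :
    solution_alt board skill = pvCount board skill := by
  obtain ⟨hne, hrows, hsk⟩ := hpre
  simp only [solution_alt, pvCount]
  rw [PySem.List.enumerate_eq_map_pyRange board [], PySem.List.len_eq,
    PySem.List.pyRange_zero_natCast, List.foldl_map, List.foldl_map]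
  apply PySem.List.foldl_congr_mem
  intro acc i hi
  apply PySem.List.foldl_congr_mem
  intro acc2 j hj
  rw [List.mem_range] at hi hj
  have hdelta : (skill.foldl (fun (delta : Int) s =>
      match s with
      | [t, r1, c1, r2, c2, d] =>
          if r1 ≤ ((i : Nat) : Int) ∧ ((i : Nat) : Int) ≤ r2 ∧ c1 ≤ (j : Int) ∧ (j : Int) ≤ c2 then
            delta + (if t = 1 then -d else d)
          else delta
      | _ => delta) 0) = pvS skill (i : Int) (j : Int) := by
    rw [PySem.List.foldl_congr_mem skill _
      (fun (delta : Int) s => delta +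
        (if s.getD 1 0 ≤ (i : Int) ∧ (i : Int) ≤ s.getD 3 0 ∧ s.getD 2 0 ≤ (j : Int) ∧ (j : Int) ≤ s.getD 4 0
          then pvEff s else 0)) 0 ?_]
    · rw [PySem.List.foldl_add]
      unfold pvS
      rw [zero_add]
    · intro acc s hsm
      obtain ⟨hlen6, hr1, hr12, hr2, hc1, hc12, hc2⟩ := hsk s hsm
      rcases s with _ | ⟨t, _ | ⟨r1, _ | ⟨c1, _ | ⟨r2, _ | ⟨c2, _ | ⟨d0, _ | ⟨x, rest⟩⟩⟩⟩⟩⟩⟩ <;>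
        simp only [List.length] at hlen6 <;> try omega
      simp only [pvEff, List.getD, List.getElem?_cons_zero, List.getElem?_cons_succ,
        Option.getD_some]
      split_ifs <;> ring
  rw [hdelta, PySem.List.pyGetD_natCast]
  rfl

-- ===== VERDICT (by name: the statement is the Claim_ definition above) =====
theorem solution_spec : Claim_equal_solution := by
  intro board skill _ hpre
  unfold Spec_solution
  rw [pv_A_eq_count board skill hpre, pv_B_eq_count board skill hpre]
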